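-- pv_equiv track=rewrite | github.com/yuriandreyev/tutors-tasks | pitable.py | calc_table
-- ===== SOURCE A (Python) =====
-- def calc_table(number):
--     ''' Function takes a number as argument and calculates Pifagor's table of the number '''
--     raw = col = list(range(1,number+1))
--     result_table = []
--
--     for num in raw:
--         result_raw = []
--         for numb in col:
--             result_raw.append(str(num*numb))
--         result_table.append(result_raw)
--     return result_table
-- ===== SOURCE B (Python) =====
-- def calc_table(number):
--     ''' Pifagor's table via an additive accumulator row instead of nested multiplication '''
--     base = list(range(1, number + 1))
--     acc = list(base)
--     table = []
--     for _ in base: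
--         table.append([str(x) for x in acc])
--         acc = [a + b for a, b in zip(acc, base)]
--     return table
-- ===== Notes on version B (the rewrite author's own statement) =====
-- stated objective: alternative
-- what changed: Replaces the doubly-nested multiplication loop with a single pass maintaining an integer accumulator row that is advanced by element-wise addition of the base row and stringified once per row.
import Mathlib
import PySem

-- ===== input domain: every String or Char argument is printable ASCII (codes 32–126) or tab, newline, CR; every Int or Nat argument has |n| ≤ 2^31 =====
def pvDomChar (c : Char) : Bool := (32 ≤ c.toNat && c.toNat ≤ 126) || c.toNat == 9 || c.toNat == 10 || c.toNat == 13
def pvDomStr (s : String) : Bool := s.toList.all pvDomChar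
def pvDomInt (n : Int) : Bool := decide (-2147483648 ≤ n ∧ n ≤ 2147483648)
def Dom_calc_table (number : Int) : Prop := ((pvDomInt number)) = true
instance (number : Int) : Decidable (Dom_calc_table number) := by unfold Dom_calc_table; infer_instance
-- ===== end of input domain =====

-- B builds each row from an additive accumulator row (one element-wise addition per row)
-- instead of A's doubly-nested multiplication; objective: alternative decomposition, same cost.

-- ===== PORT A =====
def calc_table (number : Int) : List (List String) :=
  let raw := PySem.List.pyRange 1 (number + 1) 1
  raw.map (fun num => raw.map (fun numb => PySem.Int.toStr (num * numb)))

-- ===== PORT B =====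
-- one row per element of `fuel` (Source B's `for _ in base`): emit the stringified
-- accumulator, then advance it by element-wise addition of the base row
def pvBuildRows : List Int → List Int → List Int → List (List String)
  | [], _, _ => []
  | _ :: rest, acc, base =>
      acc.map PySem.Int.toStr :: pvBuildRows rest (List.zipWith (· + ·) acc base) base

def calc_table_alt (number : Int) : List (List String) :=
  let base := PySem.List.pyRange 1 (number + 1) 1
  pvBuildRows base base base

-- ===== PRECONDITION & SPEC =====
def Spec_calc_table (number : Int) (out : List (List String)) : Prop := out = calc_table_alt number
instance (number : Int) (out : List (List String)) : Decidable (Spec_calc_table number out) := by unfold Spec_calc_table; infer_instance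

-- ===== CLAIM (what is proved, stated in full; the proofs are below) =====
def Claim_equal_calc_table : Prop := ∀ (number : Int), Dom_calc_table number → Spec_calc_table number (calc_table number)

-- ===== LEMMAS AND PROOFS =====

-- advancing the accumulator k·base by one addition of base gives (k+1)·base
lemma pv_zip_add (k : Int) (base : List Int) :
    List.zipWith (· + ·) (base.map (fun j => k * j)) base = base.map (fun j => (k + 1) * j) := by
  induction base with
  | nil => rfl
  | cons b bs ih => simp [ih]; ring

-- accumulator invariant: starting from k·base, row i of pvBuildRows is the stringified (k+i)·base
lemma pv_build_eq (fuel : List Int) (k : Int) (base : List Int) :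
    pvBuildRows fuel (base.map (fun j => k * j)) base =
      (List.range fuel.length).map
        (fun i : Nat => base.map (fun j => PySem.Int.toStr ((k + (i : Int)) * j))) := by
  induction fuel generalizing k with
  | nil => rfl
  | cons f rest ih =>
      simp only [pvBuildRows, pv_zip_add, ih (k + 1), List.length_cons,
        List.range_succ_eq_map, List.map_cons, List.map_map]
      congr 1
      · simp
      apply List.map_congr_left; intro i _
      apply List.map_congr_left; intro j _
      congr 1
      push_cast
      ring

-- the starting accumulator is 1·base, so the invariant specialises to pvBuildRows raw raw raw
lemma pv_build_self (raw : List Int) :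
    pvBuildRows raw raw raw =
      (List.range raw.length).map
        (fun i : Nat => raw.map (fun j => PySem.Int.toStr ((1 + (i : Int)) * j))) := by
  have h := pv_build_eq raw 1 raw
  simpa using h

-- ===== VERDICT (by name: the statement is the Claim_ definition above) =====
theorem calc_table_spec : Claim_equal_calc_table := by
  intro number _
  unfold Spec_calc_table calc_table calc_table_alt
  show (PySem.List.pyRange 1 (number + 1) 1).map
        (fun num => (PySem.List.pyRange 1 (number + 1) 1).map
          (fun numb => PySem.Int.toStr (num * numb)))
      = pvBuildRows (PySem.List.pyRange 1 (number + 1) 1)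
          (PySem.List.pyRange 1 (number + 1) 1) (PySem.List.pyRange 1 (number + 1) 1)
  rw [pv_build_self, PySem.List.pyRange_one]
  simp [List.map_map]
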